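-- pv_equiv track=rewrite | github.com/Delineo-Disease-Modeling/Simulation | dmp/app/state_machine/disease_configurations.py | get_available_model_paths
-- ===== SOURCE A (Python) =====
-- DISEASE_MODELS = {
--     "COVID-19": {
--         "default": {
--             "general": {
--                 "description": "General COVID-19 model",
--                 "demographics": ["Age", "Sex"]
--             }
--         },
--         "variant": {
--             "Delta": {
--                 "general": {
--                     "description": "Delta variant model",
--                     "demographics": ["Age", "Sex", "Vaccination Status"]
--                 }
--             },
--             "Omicron": {
--                 "general": {
--                     "description": "Omicron variant model",
--                     "demographics": ["Age", "Sex", "Vaccination Status"]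
--                 }
--             }
--         }
--     },
--     "Measles": {
--         "default": {
--             "general": {
--                 "description": "General measles model",
--                 "demographics": ["Age", "Sex"]
--             }
--         },
--         "vaccination": {
--             "Unvaccinated": {
--                 "general": {
--                     "description": "Unvaccinated measles model",
--                     "demographics": ["Age", "Sex"]
--                 }
--             },
--             "Partially Vaccinated": {
--                 "general": {
--                     "description": "Partially vaccinated measles model",
--                     "demographics": ["Age", "Sex"]
--                 }
--             },
--             "Fully Vaccinated": {
--                 "general": {
--                     "description": "Fully vaccinated measles model",
--                     "demographics": ["Age", "Sex"]
--                 }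
--             }
--         }
--     },
--     "Influenza": {
--         "default": {
--             "general": {
--                 "description": "General influenza model",
--                 "demographics": ["Age", "Sex"]
--             }
--         }
--     },
--     "Ebola": {
--         "default": {
--             "general": {
--                 "description": "General Ebola model",
--                 "demographics": ["Age", "Sex"]
--             }
--         }
--     },
--     "Zika": {
--         "default": {
--             "general": {
--                 "description": "General Zika model",
--                 "demographics": ["Age", "Sex"]
--             }
--         }
--     }
-- }
--
-- def get_disease_models(disease_name):
--     """Get the nested model structure for a specific disease"""
--     return DISEASE_MODELS.get(disease_name, {})
--
-- def get_available_model_paths(disease_name):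
--     """Get all available model paths for a disease as dot-notation strings"""
--     models = get_disease_models(disease_name)
--     paths = []
--
--     def _collect_paths(node, current_path=""):
--         for key, value in node.items():
--             if isinstance(value, dict) and "description" in value:
--                 # This is a leaf node (actual model)
--                 full_path = f"{current_path}.{key}" if current_path else key
--                 paths.append(full_path)
--             elif isinstance(value, dict):
--                 # This is a branch node (category)
--                 new_path = f"{current_path}.{key}" if current_path else key
--                 _collect_paths(value, new_path)
--
--     _collect_paths(models)
--     return paths
-- ===== SOURCE B (Python) =====
-- DISEASE_MODELS = {
--     "COVID-19": {
--         "default": {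
--             "general": {
--                 "description": "General COVID-19 model",
--                 "demographics": ["Age", "Sex"]
--             }
--         },
--         "variant": {
--             "Delta": {
--                 "general": {
--                     "description": "Delta variant model",
--                     "demographics": ["Age", "Sex", "Vaccination Status"]
--                 }
--             },
--             "Omicron": {
--                 "general": {
--                     "description": "Omicron variant model",
--                     "demographics": ["Age", "Sex", "Vaccination Status"]
--                 }
--             }
--         }
--     },
--     "Measles": {
--         "default": {
--             "general": {
--                 "description": "General measles model",
--                 "demographics": ["Age", "Sex"]
--             }
--         },
--         "vaccination": {
--             "Unvaccinated": {
--                 "general": {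
--                     "description": "Unvaccinated measles model",
--                     "demographics": ["Age", "Sex"]
--                 }
--             },
--             "Partially Vaccinated": {
--                 "general": {
--                     "description": "Partially vaccinated measles model",
--                     "demographics": ["Age", "Sex"]
--                 }
--             },
--             "Fully Vaccinated": {
--                 "general": {
--                     "description": "Fully vaccinated measles model",
--                     "demographics": ["Age", "Sex"]
--                 }
--             }
--         }
--     },
--     "Influenza": {
--         "default": {
--             "general": {
--                 "description": "General influenza model",
--                 "demographics": ["Age", "Sex"]
--             }
--         }
--     },
--     "Ebola": {
--         "default": {
--             "general": {
--                 "description": "General Ebola model",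
--                 "demographics": ["Age", "Sex"]
--             }
--         }
--     },
--     "Zika": {
--         "default": {
--             "general": {
--                 "description": "General Zika model",
--                 "demographics": ["Age", "Sex"]
--             }
--         }
--     }
-- }
--
--
-- def get_available_model_paths(disease_name):
--     """Get all available model paths for a disease as dot-notation strings.
--
--     Iterative version: an explicit LIFO stack of (key, value, parent_path)
--     tasks replaces the recursive helper; tasks are pushed in reversed order
--     so popping visits entries in insertion-order pre-order.
--     """
--     paths = []
--     models = DISEASE_MODELS.get(disease_name, {})
--     stack = [(k, v, "") for k, v in reversed(list(models.items()))]
--     while stack: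
--         key, value, parent = stack.pop()
--         if not isinstance(value, dict):
--             continue
--         path = f"{parent}.{key}" if parent else key
--         if "description" in value:
--             paths.append(path)
--         else:
--             stack.extend((k, v, path) for k, v in reversed(list(value.items())))
--     return paths
-- ===== Notes on version B (the rewrite author's own statement) =====
-- stated objective: alternative
-- what changed: The recursive inner closure appending to a shared mutable list is replaced by an iterative traversal with an explicit LIFO stack of (key, value, parent_path) tasks, pushed in reversed order so popping preserves A's insertion-order pre-order of leaf paths.
import Mathlib
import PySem

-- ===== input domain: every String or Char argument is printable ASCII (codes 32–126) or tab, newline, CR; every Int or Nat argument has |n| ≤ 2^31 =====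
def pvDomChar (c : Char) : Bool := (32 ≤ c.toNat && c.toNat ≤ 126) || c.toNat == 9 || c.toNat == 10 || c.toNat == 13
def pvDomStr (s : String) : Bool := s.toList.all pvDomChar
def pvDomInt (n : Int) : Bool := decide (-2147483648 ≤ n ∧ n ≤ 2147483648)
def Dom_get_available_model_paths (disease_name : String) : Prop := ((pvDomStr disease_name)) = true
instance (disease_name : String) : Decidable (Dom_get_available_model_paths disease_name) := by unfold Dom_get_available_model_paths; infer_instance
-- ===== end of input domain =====

-- B replaces A's recursive closure over a mutable list by an explicit LIFO stack of
-- (key, value, parent_path) tasks (objective: alternative decomposition, same cost).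

-- The constant nested-dict structure DISEASE_MODELS: a value is either a model leaf
-- (a dict containing "description" — its contents never influence the result) or a
-- branch dict of further entries, kept in insertion order.
mutual
inductive DVal : Type where
  | leaf : DVal                    -- dict containing "description"
  | branch : DEntries → DVal       -- category dict
inductive DEntries : Type where
  | nil : DEntries
  | cons : String → DVal → DEntries → DEntries
end

def genLeaf : DEntries := .cons "general" .leaf .nil

def covidTree : DEntries :=
  .cons "default" (.branch genLeaf)
    (.cons "variant"
      (.branch (.cons "Delta" (.branch genLeaf)
                 (.cons "Omicron" (.branch genLeaf) .nil)))
      .nil)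

def measlesTree : DEntries :=
  .cons "default" (.branch genLeaf)
    (.cons "vaccination"
      (.branch (.cons "Unvaccinated" (.branch genLeaf)
                 (.cons "Partially Vaccinated" (.branch genLeaf)
                   (.cons "Fully Vaccinated" (.branch genLeaf) .nil))))
      .nil)

def defaultOnlyTree : DEntries := .cons "default" (.branch genLeaf) .nil

def DISEASE_MODELS : PySem.Dict String DEntries :=
  PySem.Dict.mk
    [("COVID-19", covidTree), ("Measles", measlesTree),
     ("Influenza", defaultOnlyTree), ("Ebola", defaultOnlyTree), ("Zika", defaultOnlyTree)]

-- shared by both ports: f"{parent}.{key}" if parent else key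
def dotJoin (parent key : String) : String :=
  if parent = "" then key else parent ++ "." ++ key

-- ===== PORT A =====
def get_disease_models (disease_name : String) : DEntries :=
  PySem.Dict.getD DISEASE_MODELS disease_name .nil

-- the recursive closure _collect_paths; `paths` is the mutable accumulator list
def collect_paths : DEntries → String → List String → List String
  | .nil, _, paths => paths
  | .cons key v rest, cur, paths =>
    match v with
    | .leaf => collect_paths rest cur (paths ++ [dotJoin cur key])
    | .branch node => collect_paths rest cur (collect_paths node (dotJoin cur key) paths)

def get_available_model_paths (disease_name : String) : List String :=
  collect_paths (get_disease_models disease_name) "" []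

-- ===== PORT B =====
-- Python pushes a node's (k, v, parent) tasks in reversed order on the end of the
-- stack and pops from the end; head-of-list is the stack top here, so the tasks of a
-- node sit on the stack in insertion order, first entry on top:
def tasks_of : DEntries → String → List (String × DVal × String)
  | .nil, _ => []
  | .cons k v rest, p => (k, v, p) :: tasks_of rest p

-- the while-loop over the stack; the Nat fuel is a totality guard only (every stack
-- reachable from the constant DISEASE_MODELS is exhausted long before 1000 steps)
def run_stack : Nat → List (String × DVal × String) → List String → List String
  | 0, _, paths => paths
  | _ + 1, [], paths => paths
  | fuel + 1, (key, v, parent) :: rest, paths =>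
    match v with
    | .leaf => run_stack fuel rest (paths ++ [dotJoin parent key])
    | .branch node => run_stack fuel (tasks_of node (dotJoin parent key) ++ rest) paths

def get_available_model_paths_alt (disease_name : String) : List String :=
  run_stack 1000 (tasks_of (PySem.Dict.getD DISEASE_MODELS disease_name .nil) "") []

-- ===== PRECONDITION & SPEC =====
def Spec_get_available_model_paths (disease_name : String) (out : List String) : Prop := out = get_available_model_paths_alt disease_name
instance (disease_name : String) (out : List String) : Decidable (Spec_get_available_model_paths disease_name out) := by unfold Spec_get_available_model_paths; infer_instance

-- ===== CLAIM (what is proved, stated in full; the proofs are below) =====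
def Claim_equal_get_available_model_paths : Prop := ∀ (disease_name : String), Dom_get_available_model_paths disease_name → Spec_get_available_model_paths disease_name (get_available_model_paths disease_name)

-- ===== LEMMAS AND PROOFS =====

-- the lookup can only produce one of the five literal trees or the empty dict
theorem models_cases (d : String) :
    get_disease_models d = covidTree ∨ get_disease_models d = measlesTree ∨
    get_disease_models d = defaultOnlyTree ∨ get_disease_models d = .nil := by
  unfold get_disease_models DISEASE_MODELS
  simp only [PySem.Dict.getD_eq_get?_getD, PySem.Dict.get?_mk_cons]
  split_ifs <;> simp [PySem.Dict.get?, Option.getD]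

-- ===== VERDICT (by name: the statement is the Claim_ definition above) =====
theorem get_available_model_paths_spec : Claim_equal_get_available_model_paths := by
  intro d _
  unfold Spec_get_available_model_paths get_available_model_paths get_available_model_paths_alt
    get_disease_models
  have h := models_cases d
  unfold get_disease_models at h
  rcases h with h | h | h | h <;> rw [h] <;> decide
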